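-- pv_equiv track=rewrite | github.com/birat-timsina/HITI37_GroupAssignment2 | encrypt_decrypt.py | encrypt_txt
-- ===== SOURCE A (Python) =====
-- def lower_encrypt(char,shift1,shift2):   #function to encrypt lowercase characters
--     if "a" <= char <="m":                #checking if the character is in the first half of the alphabet
--         shift = shift1 * shift2          #calculating the total shift by multiplying the two shift values
--         base = ord("a")                  #getting the ASCII value of 'a' to use as a base for the shift
--         return chr((ord(char) - base + shift) % 26 + base) #shifting the character by the calculated shift and wrapping around using modulo 26, then converting back to a character
--
--
--     if "n" <= char <="z":     #checking if the character is in the second half of the alphabet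
--         shift = shift1 * shift2
--         base = ord("n")                  #getting the ASCII value of 'n' to use as a base for the shift
--         return chr((ord(char) - base + shift) % 26 + base)
--
--     return char
--
-- def upper_encrypt(char,shift1,shift2):  #function to encrypt uppercase characters
--     if "A" <= char <="M":
--         shift = shift1 * shift2
--         base = ord("A")           #getting the ASCII value of 'A' to use as a base for the shift
--         return chr((ord(char) - base + shift) % 26 + base)
--
--
--     if "N" <= char <="Z":
--         shift = shift1 * shift2
--         base = ord("N")                  #getting the ASCII value of 'N' to use as a base for the shift
--         return chr((ord(char) - base + shift) % 26 + base)
--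
--     return char
--
-- def encrypt_txt(text,shift1,shift2):   #function to encrypt the entire text using the lower_encrypt and upper_encrypt functions.
--     encrypt_chars = []
--     meta = []
--
--     for char in text:
--         if "a" <= char <="m":
--             encrypt_char = lower_encrypt(char,shift1,shift2) #encrypting the character using the lower_encrypt function
--             encrypt_chars.append(encrypt_char)         #appending the encrypted character to the encrypt_chars list
--             meta.append("L")           #appending "L" to the meta list to indicate that the character was a lowercase letter
--         elif "A" <= char <="M":
--             encrypt_char = upper_encrypt(char,shift1,shift2)      #encrypting the character using the upper_encrypt function
--             encrypt_chars.append(encrypt_char)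
--             meta.append("U")
--         elif "n" <= char <="z":                            #checking if the character and encrypting it using the lower_encrypt function
--             encrypt_char = lower_encrypt(char,shift1,shift2)
--             encrypt_chars.append(encrypt_char)
--             meta.append("L")
--         elif "N" <= char <="Z":                #checking if the character and encrypting it using the upper_encrypt function
--             encrypt_char = upper_encrypt(char,shift1,shift2)
--             encrypt_chars.append(encrypt_char)
--             meta.append("U")
--         else:
--             encrypt_chars.append(char)
--             meta.append("0")
--
--     return "".join(encrypt_chars), "".join(meta)
-- ===== SOURCE B (Python) =====
-- def encrypt_txt(text, shift1, shift2):
--     # Table-driven: precompute one (encrypted_char, meta_char) pair per letter,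
--     # then make a single lookup pass over the text.
--     shift = shift1 * shift2
--     table = {}
--     for base, meta_tag in ((97, "L"), (110, "L"), (65, "U"), (78, "U")):
--         for off in range(13):
--             table[chr(base + off)] = (chr((off + shift) % 26 + base), meta_tag)
--     enc_chars = []
--     meta_chars = []
--     for ch in text:
--         e, m = table.get(ch, (ch, "0"))
--         enc_chars.append(e)
--         meta_chars.append(m)
--     return "".join(enc_chars), "".join(meta_chars)
-- ===== Notes on version B (the rewrite author's own statement) =====
-- stated objective: alternative
-- what changed: Replaces A's four-way per-character range branch (with re-branching helper functions) by a precomputed 52-entry lookup table mapping each letter to its (encrypted char, meta char) pair, followed by a single table-lookup pass over the text.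
import Mathlib
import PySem

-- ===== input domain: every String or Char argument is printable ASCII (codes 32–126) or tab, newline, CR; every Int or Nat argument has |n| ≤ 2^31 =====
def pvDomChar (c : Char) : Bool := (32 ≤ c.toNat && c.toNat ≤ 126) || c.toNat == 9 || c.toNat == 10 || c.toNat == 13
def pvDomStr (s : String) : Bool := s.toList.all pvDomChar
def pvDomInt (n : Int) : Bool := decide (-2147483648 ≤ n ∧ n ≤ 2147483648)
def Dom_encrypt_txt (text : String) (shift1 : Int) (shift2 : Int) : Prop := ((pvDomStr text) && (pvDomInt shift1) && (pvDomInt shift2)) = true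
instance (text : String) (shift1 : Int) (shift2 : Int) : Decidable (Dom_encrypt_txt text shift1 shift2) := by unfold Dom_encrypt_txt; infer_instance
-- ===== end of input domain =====

-- B replaces A's four-way per-character branch by a precomputed 52-entry lookup table
-- (letter → (encrypted char, meta char)) and a single table-lookup pass (objective: alternative).

-- ===== PORT A =====
-- chr(n) is ported as Char.ofNat n: exact here because every argument is
-- (… % 26) + base with base ∈ {97, 110, 65, 78}, i.e. in [65, 135], a valid code point.
-- ord("a") etc. are written as their numeric values 97/110/65/78.
def lower_encrypt (char : Char) (shift1 : Int) (shift2 : Int) : Char :=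
  if 'a' ≤ char ∧ char ≤ 'm' then
    Char.ofNat ((PySem.Int.mod ((char.toNat : Int) - 97 + shift1 * shift2) 26 + 97).toNat)
  else if 'n' ≤ char ∧ char ≤ 'z' then
    Char.ofNat ((PySem.Int.mod ((char.toNat : Int) - 110 + shift1 * shift2) 26 + 110).toNat)
  else char

def upper_encrypt (char : Char) (shift1 : Int) (shift2 : Int) : Char :=
  if 'A' ≤ char ∧ char ≤ 'M' then
    Char.ofNat ((PySem.Int.mod ((char.toNat : Int) - 65 + shift1 * shift2) 26 + 65).toNat)
  else if 'N' ≤ char ∧ char ≤ 'Z' then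
    Char.ofNat ((PySem.Int.mod ((char.toNat : Int) - 78 + shift1 * shift2) 26 + 78).toNat)
  else char

-- the loop appends single characters to two lists; "".join(list of 1-char strings) = String.ofList
def encrypt_txt (text : String) (shift1 : Int) (shift2 : Int) : String × String :=
  let p := text.toList.foldl
    (fun (acc : List Char × List Char) char =>
      if 'a' ≤ char ∧ char ≤ 'm' then
        (acc.1 ++ [lower_encrypt char shift1 shift2], acc.2 ++ ['L'])
      else if 'A' ≤ char ∧ char ≤ 'M' then
        (acc.1 ++ [upper_encrypt char shift1 shift2], acc.2 ++ ['U'])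
      else if 'n' ≤ char ∧ char ≤ 'z' then
        (acc.1 ++ [lower_encrypt char shift1 shift2], acc.2 ++ ['L'])
      else if 'N' ≤ char ∧ char ≤ 'Z' then
        (acc.1 ++ [upper_encrypt char shift1 shift2], acc.2 ++ ['U'])
      else (acc.1 ++ [char], acc.2 ++ ['0']))
    ([], [])
  (String.ofList p.1, String.ofList p.2)

-- ===== PORT B =====
-- the table of Source B: for base, meta in ((97,"L"),(110,"L"),(65,"U"),(78,"U")): for off in range(13): …
def encTable (shift : Int) : PySem.Dict Char (Char × Char) :=
  ([(97, 'L'), (110, 'L'), (65, 'U'), (78, 'U')] : List (Nat × Char)).foldl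
    (fun d p =>
      (PySem.List.pyRange 0 13 1).foldl
        (fun d off =>
          d.insert (Char.ofNat (p.1 + off.toNat))
            (Char.ofNat ((PySem.Int.mod (off + shift) 26 + (p.1 : Int)).toNat), p.2)) d)
    PySem.Dict.empty

def encrypt_txt_alt (text : String) (shift1 : Int) (shift2 : Int) : String × String :=
  let table := encTable (shift1 * shift2)
  let p := text.toList.foldl
    (fun (acc : List Char × List Char) ch =>
      let em := table.getD ch (ch, '0')
      (acc.1 ++ [em.1], acc.2 ++ [em.2]))
    ([], [])
  (String.ofList p.1, String.ofList p.2)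

-- ===== PRECONDITION & SPEC =====
def Spec_encrypt_txt (text : String) (shift1 : Int) (shift2 : Int) (out : String × String) : Prop := out = encrypt_txt_alt text shift1 shift2
instance (text : String) (shift1 : Int) (shift2 : Int) (out : String × String) : Decidable (Spec_encrypt_txt text shift1 shift2 out) := by unfold Spec_encrypt_txt; infer_instance

-- ===== CLAIM (what is proved, stated in full; the proofs are below) =====
def Claim_equal_encrypt_txt : Prop := ∀ (text : String) (shift1 : Int) (shift2 : Int), Dom_encrypt_txt text shift1 shift2 → Spec_encrypt_txt text shift1 shift2 (encrypt_txt text shift1 shift2)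

-- ===== LEMMAS AND PROOFS =====
theorem char_eq_ofNat_iff (c : Char) (n : Nat) (hn : n < 55296) : (c = Char.ofNat n) ↔ c.toNat = n := by
  constructor
  · intro h; subst h; rw [Char.toNat_ofNat, if_pos (Or.inl hn)]
  · intro h; rw [← Char.ofNat_toNat c, h]

theorem char_le_iff (a b : Char) : (a ≤ b) ↔ a.toNat ≤ b.toNat := by
  rw [Char.le_def, UInt32.le_iff_toNat_le]; rfl

theorem eqk65 (c : Char) : (c = Char.ofNat 65) ↔ c.toNat = 65 := char_eq_ofNat_iff c 65 (by norm_num)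
theorem eqk66 (c : Char) : (c = Char.ofNat 66) ↔ c.toNat = 66 := char_eq_ofNat_iff c 66 (by norm_num)
theorem eqk67 (c : Char) : (c = Char.ofNat 67) ↔ c.toNat = 67 := char_eq_ofNat_iff c 67 (by norm_num)
theorem eqk68 (c : Char) : (c = Char.ofNat 68) ↔ c.toNat = 68 := char_eq_ofNat_iff c 68 (by norm_num)
theorem eqk69 (c : Char) : (c = Char.ofNat 69) ↔ c.toNat = 69 := char_eq_ofNat_iff c 69 (by norm_num)
theorem eqk70 (c : Char) : (c = Char.ofNat 70) ↔ c.toNat = 70 := char_eq_ofNat_iff c 70 (by norm_num)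
theorem eqk71 (c : Char) : (c = Char.ofNat 71) ↔ c.toNat = 71 := char_eq_ofNat_iff c 71 (by norm_num)
theorem eqk72 (c : Char) : (c = Char.ofNat 72) ↔ c.toNat = 72 := char_eq_ofNat_iff c 72 (by norm_num)
theorem eqk73 (c : Char) : (c = Char.ofNat 73) ↔ c.toNat = 73 := char_eq_ofNat_iff c 73 (by norm_num)
theorem eqk74 (c : Char) : (c = Char.ofNat 74) ↔ c.toNat = 74 := char_eq_ofNat_iff c 74 (by norm_num)
theorem eqk75 (c : Char) : (c = Char.ofNat 75) ↔ c.toNat = 75 := char_eq_ofNat_iff c 75 (by norm_num)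
theorem eqk76 (c : Char) : (c = Char.ofNat 76) ↔ c.toNat = 76 := char_eq_ofNat_iff c 76 (by norm_num)
theorem eqk77 (c : Char) : (c = Char.ofNat 77) ↔ c.toNat = 77 := char_eq_ofNat_iff c 77 (by norm_num)
theorem eqk78 (c : Char) : (c = Char.ofNat 78) ↔ c.toNat = 78 := char_eq_ofNat_iff c 78 (by norm_num)
theorem eqk79 (c : Char) : (c = Char.ofNat 79) ↔ c.toNat = 79 := char_eq_ofNat_iff c 79 (by norm_num)
theorem eqk80 (c : Char) : (c = Char.ofNat 80) ↔ c.toNat = 80 := char_eq_ofNat_iff c 80 (by norm_num)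
theorem eqk81 (c : Char) : (c = Char.ofNat 81) ↔ c.toNat = 81 := char_eq_ofNat_iff c 81 (by norm_num)
theorem eqk82 (c : Char) : (c = Char.ofNat 82) ↔ c.toNat = 82 := char_eq_ofNat_iff c 82 (by norm_num)
theorem eqk83 (c : Char) : (c = Char.ofNat 83) ↔ c.toNat = 83 := char_eq_ofNat_iff c 83 (by norm_num)
theorem eqk84 (c : Char) : (c = Char.ofNat 84) ↔ c.toNat = 84 := char_eq_ofNat_iff c 84 (by norm_num)
theorem eqk85 (c : Char) : (c = Char.ofNat 85) ↔ c.toNat = 85 := char_eq_ofNat_iff c 85 (by norm_num)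
theorem eqk86 (c : Char) : (c = Char.ofNat 86) ↔ c.toNat = 86 := char_eq_ofNat_iff c 86 (by norm_num)
theorem eqk87 (c : Char) : (c = Char.ofNat 87) ↔ c.toNat = 87 := char_eq_ofNat_iff c 87 (by norm_num)
theorem eqk88 (c : Char) : (c = Char.ofNat 88) ↔ c.toNat = 88 := char_eq_ofNat_iff c 88 (by norm_num)
theorem eqk89 (c : Char) : (c = Char.ofNat 89) ↔ c.toNat = 89 := char_eq_ofNat_iff c 89 (by norm_num)
theorem eqk90 (c : Char) : (c = Char.ofNat 90) ↔ c.toNat = 90 := char_eq_ofNat_iff c 90 (by norm_num)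
theorem eqk97 (c : Char) : (c = Char.ofNat 97) ↔ c.toNat = 97 := char_eq_ofNat_iff c 97 (by norm_num)
theorem eqk98 (c : Char) : (c = Char.ofNat 98) ↔ c.toNat = 98 := char_eq_ofNat_iff c 98 (by norm_num)
theorem eqk99 (c : Char) : (c = Char.ofNat 99) ↔ c.toNat = 99 := char_eq_ofNat_iff c 99 (by norm_num)
theorem eqk100 (c : Char) : (c = Char.ofNat 100) ↔ c.toNat = 100 := char_eq_ofNat_iff c 100 (by norm_num)
theorem eqk101 (c : Char) : (c = Char.ofNat 101) ↔ c.toNat = 101 := char_eq_ofNat_iff c 101 (by norm_num)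
theorem eqk102 (c : Char) : (c = Char.ofNat 102) ↔ c.toNat = 102 := char_eq_ofNat_iff c 102 (by norm_num)
theorem eqk103 (c : Char) : (c = Char.ofNat 103) ↔ c.toNat = 103 := char_eq_ofNat_iff c 103 (by norm_num)
theorem eqk104 (c : Char) : (c = Char.ofNat 104) ↔ c.toNat = 104 := char_eq_ofNat_iff c 104 (by norm_num)
theorem eqk105 (c : Char) : (c = Char.ofNat 105) ↔ c.toNat = 105 := char_eq_ofNat_iff c 105 (by norm_num)
theorem eqk106 (c : Char) : (c = Char.ofNat 106) ↔ c.toNat = 106 := char_eq_ofNat_iff c 106 (by norm_num)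
theorem eqk107 (c : Char) : (c = Char.ofNat 107) ↔ c.toNat = 107 := char_eq_ofNat_iff c 107 (by norm_num)
theorem eqk108 (c : Char) : (c = Char.ofNat 108) ↔ c.toNat = 108 := char_eq_ofNat_iff c 108 (by norm_num)
theorem eqk109 (c : Char) : (c = Char.ofNat 109) ↔ c.toNat = 109 := char_eq_ofNat_iff c 109 (by norm_num)
theorem eqk110 (c : Char) : (c = Char.ofNat 110) ↔ c.toNat = 110 := char_eq_ofNat_iff c 110 (by norm_num)
theorem eqk111 (c : Char) : (c = Char.ofNat 111) ↔ c.toNat = 111 := char_eq_ofNat_iff c 111 (by norm_num)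
theorem eqk112 (c : Char) : (c = Char.ofNat 112) ↔ c.toNat = 112 := char_eq_ofNat_iff c 112 (by norm_num)
theorem eqk113 (c : Char) : (c = Char.ofNat 113) ↔ c.toNat = 113 := char_eq_ofNat_iff c 113 (by norm_num)
theorem eqk114 (c : Char) : (c = Char.ofNat 114) ↔ c.toNat = 114 := char_eq_ofNat_iff c 114 (by norm_num)
theorem eqk115 (c : Char) : (c = Char.ofNat 115) ↔ c.toNat = 115 := char_eq_ofNat_iff c 115 (by norm_num)
theorem eqk116 (c : Char) : (c = Char.ofNat 116) ↔ c.toNat = 116 := char_eq_ofNat_iff c 116 (by norm_num)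
theorem eqk117 (c : Char) : (c = Char.ofNat 117) ↔ c.toNat = 117 := char_eq_ofNat_iff c 117 (by norm_num)
theorem eqk118 (c : Char) : (c = Char.ofNat 118) ↔ c.toNat = 118 := char_eq_ofNat_iff c 118 (by norm_num)
theorem eqk119 (c : Char) : (c = Char.ofNat 119) ↔ c.toNat = 119 := char_eq_ofNat_iff c 119 (by norm_num)
theorem eqk120 (c : Char) : (c = Char.ofNat 120) ↔ c.toNat = 120 := char_eq_ofNat_iff c 120 (by norm_num)
theorem eqk121 (c : Char) : (c = Char.ofNat 121) ↔ c.toNat = 121 := char_eq_ofNat_iff c 121 (by norm_num)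
theorem eqk122 (c : Char) : (c = Char.ofNat 122) ↔ c.toNat = 122 := char_eq_ofNat_iff c 122 (by norm_num)
theorem lita : ('a' : Char).toNat = 97 := rfl
theorem litm : ('m' : Char).toNat = 109 := rfl
theorem litn : ('n' : Char).toNat = 110 := rfl
theorem litz : ('z' : Char).toNat = 122 := rfl
theorem litA : ('A' : Char).toNat = 65 := rfl
theorem litM : ('M' : Char).toNat = 77 := rfl
theorem litN : ('N' : Char).toNat = 78 := rfl
theorem litZ : ('Z' : Char).toNat = 90 := rfl

set_option maxHeartbeats 2000000 in
theorem step_eq (s1 s2 : Int) (c : Char) :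
    (encTable (s1 * s2)).getD c (c, '0') =
      (if 'a' ≤ c ∧ c ≤ 'm' then (lower_encrypt c s1 s2, 'L')
       else if 'A' ≤ c ∧ c ≤ 'M' then (upper_encrypt c s1 s2, 'U')
       else if 'n' ≤ c ∧ c ≤ 'z' then (lower_encrypt c s1 s2, 'L')
       else if 'N' ≤ c ∧ c ≤ 'Z' then (upper_encrypt c s1 s2, 'U')
       else (c, '0')) := by
  have hr : PySem.List.pyRange 0 13 1 = [0,1,2,3,4,5,6,7,8,9,10,11,12] := by decide
  simp only [encTable, hr, List.foldl, PySem.Dict.getD_insert, PySem.Dict.getD_empty,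
    lower_encrypt, upper_encrypt]
  simp only [Int.reduceToNat, Nat.reduceAdd]
  simp only [eqk65, eqk66, eqk67, eqk68, eqk69, eqk70, eqk71, eqk72, eqk73, eqk74, eqk75, eqk76, eqk77, eqk78, eqk79, eqk80, eqk81, eqk82, eqk83, eqk84, eqk85, eqk86, eqk87, eqk88, eqk89, eqk90, eqk97, eqk98, eqk99, eqk100, eqk101, eqk102, eqk103, eqk104, eqk105, eqk106, eqk107, eqk108, eqk109, eqk110, eqk111, eqk112, eqk113, eqk114, eqk115, eqk116, eqk117, eqk118, eqk119, eqk120, eqk121, eqk122, char_le_iff, lita, litm, litn, litz, litA, litM, litN, litZ,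
    PySem.Int.mod_eq_emod_of_pos (show (0:Int) < 26 by norm_num)]
  by_cases hU : 65 ≤ c.toNat ∧ c.toNat ≤ 90
  · obtain ⟨hU1, hU2⟩ := hU
    interval_cases h : c.toNat <;> norm_num
  · by_cases hL : 97 ≤ c.toNat ∧ c.toNat ≤ 122
    · obtain ⟨hL1, hL2⟩ := hL
      interval_cases h : c.toNat <;> norm_num
    · repeat rw [if_neg (by omega)]

theorem step_fun_eq (shift1 shift2 : Int) :
    (fun (acc : List Char × List Char) ch =>
        let em := (encTable (shift1 * shift2)).getD ch (ch, '0')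
        (acc.1 ++ [em.1], acc.2 ++ [em.2])) =
    (fun (acc : List Char × List Char) char =>
        if 'a' ≤ char ∧ char ≤ 'm' then
          (acc.1 ++ [lower_encrypt char shift1 shift2], acc.2 ++ ['L'])
        else if 'A' ≤ char ∧ char ≤ 'M' then
          (acc.1 ++ [upper_encrypt char shift1 shift2], acc.2 ++ ['U'])
        else if 'n' ≤ char ∧ char ≤ 'z' then
          (acc.1 ++ [lower_encrypt char shift1 shift2], acc.2 ++ ['L'])
        else if 'N' ≤ char ∧ char ≤ 'Z' then
          (acc.1 ++ [upper_encrypt char shift1 shift2], acc.2 ++ ['U'])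
        else (acc.1 ++ [char], acc.2 ++ ['0'])) := by
  funext acc ch
  show (acc.1 ++ [((encTable (shift1 * shift2)).getD ch (ch, '0')).1],
        acc.2 ++ [((encTable (shift1 * shift2)).getD ch (ch, '0')).2]) = _
  rw [step_eq]
  split_ifs <;> rfl

-- ===== VERDICT (by name: the statement is the Claim_ definition above) =====
theorem encrypt_txt_spec : Claim_equal_encrypt_txt := by
  intro text shift1 shift2 _
  unfold Spec_encrypt_txt
  simp only [encrypt_txt, encrypt_txt_alt]
  rw [step_fun_eq]
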